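-- pv_equiv track=rewrite | github.com/TakayukiHirano117/interviewcat | maximum_frequency_difference/my.py | most_frequency
-- ===== SOURCE A (Python) =====
-- from typing import List
-- from collections import defaultdict
--
-- def most_frequency(nums: List[int]) -> int:
--     freq_map = defaultdict(int)
--     most_frequent_diff_cnt = 0
--
--     for i in range(len(nums)-1):
--         diff = abs(nums[i+1] - nums[i])
--         freq_map[diff] += 1
--         most_frequent_diff_cnt = max(most_frequent_diff_cnt, freq_map[diff])
--
--     return most_frequent_diff_cnt
-- ===== SOURCE B (Python) =====
-- from typing import List
--
--
-- def most_frequency(nums: List[int]) -> int: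
--     # Sort the adjacent absolute differences; equal values become adjacent,
--     # so the maximum frequency is the length of the longest run of equal
--     # consecutive elements -- no hash map at all.
--     diffs = sorted(abs(b - a) for a, b in zip(nums, nums[1:]))
--     best = 0
--     run = 0
--     prev = None
--     for d in diffs:
--         run = run + 1 if d == prev else 1
--         if run > best:
--             best = run
--         prev = d
--     return best
-- ===== Notes on version B (the rewrite author's own statement) =====
-- stated objective: alternative
-- what changed: B drops the hash map entirely: it sorts the list of adjacent absolute differences and returns the length of the longest run of equal consecutive elements (sort-then-scan), whereas A counts occurrences in a defaultdict while tracking a running maximum.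
import Mathlib
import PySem

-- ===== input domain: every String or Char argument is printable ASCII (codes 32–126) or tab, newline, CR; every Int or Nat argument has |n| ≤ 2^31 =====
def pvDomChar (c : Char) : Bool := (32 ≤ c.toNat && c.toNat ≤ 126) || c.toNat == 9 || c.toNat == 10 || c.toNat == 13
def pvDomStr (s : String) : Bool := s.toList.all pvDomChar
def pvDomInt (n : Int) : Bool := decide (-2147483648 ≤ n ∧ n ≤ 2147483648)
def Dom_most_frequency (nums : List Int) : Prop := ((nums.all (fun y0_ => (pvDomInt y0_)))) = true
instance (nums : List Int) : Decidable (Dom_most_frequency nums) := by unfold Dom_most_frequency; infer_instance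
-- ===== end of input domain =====

-- B replaces A's hash-map counting with sort-then-scan: sort the adjacent absolute
-- differences and take the longest run of equal consecutive elements; alternative algorithm, same result.

-- ===== PORT A =====
-- the loop indices i and i+1 are always in range, so nums[i] is ported as pyGetD (the default is never read)
def most_frequency (nums : List Int) : Int :=
  (((PySem.List.pyRange 0 ((nums.length : Int) - 1)).foldl
    (fun (st : PySem.Dict Int Int × Int) i =>
      let diff := |PySem.List.pyGetD nums (i + 1) 0 - PySem.List.pyGetD nums i 0|
      let fm := st.1.modify diff 0 (· + 1)
      (fm, max st.2 (fm.getD diff 0)))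
    (PySem.Dict.empty, 0))).2

-- ===== PORT B =====
-- state = (best, run, prev); `d == prev` with prev = None is False in Python, matched by the Option
def most_frequency_alt (nums : List Int) : Int :=
  let diffs := PySem.List.sorted
    ((nums.zip (PySem.List.slice nums (some 1) none)).map (fun p => |p.2 - p.1|))
    (fun x => x) false
  (diffs.foldl
    (fun (st : Int × Int × Option Int) d =>
      let run := if some d = st.2.2 then st.2.1 + 1 else 1
      let best := if run > st.1 then run else st.1
      (best, run, some d))
    (0, 0, none)).1

-- ===== PRECONDITION & SPEC =====
def Spec_most_frequency (nums : List Int) (out : Int) : Prop := out = most_frequency_alt nums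
instance (nums : List Int) (out : Int) : Decidable (Spec_most_frequency nums out) := by unfold Spec_most_frequency; infer_instance

-- ===== CLAIM (what is proved, stated in full; the proofs are below) =====
def Claim_equal_most_frequency : Prop := ∀ (nums : List Int), Dom_most_frequency nums → Spec_most_frequency nums (most_frequency nums)

-- ===== LEMMAS AND PROOFS =====

-- the list of adjacent absolute differences, common reference point of both proofs
def pvDiffs (nums : List Int) : List Int :=
  (nums.zip nums.tail).map (fun p => |p.2 - p.1|)

-- A's loop body, with the diff already computed
def pvStep (st : PySem.Dict Int Int × Int) (x : Int) : PySem.Dict Int Int × Int :=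
  let fm := st.1.modify x 0 (· + 1)
  (fm, max st.2 (fm.getD x 0))

-- B's loop body
def pvStepB (st : Int × Int × Option Int) (d : Int) : Int × Int × Option Int :=
  let run := if some d = st.2.2 then st.2.1 + 1 else 1
  let best := if run > st.1 then run else st.1
  (best, run, some d)

-- A's index loop reads exactly the adjacent-difference list
lemma pvMapRange (nums : List Int) :
    (PySem.List.pyRange 0 ((nums.length : Int) - 1)).map
      (fun i => |PySem.List.pyGetD nums (i + 1) 0 - PySem.List.pyGetD nums i 0|)
      = pvDiffs nums := by
  match nums with
  | [] => decide
  | a :: t =>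
    have h : ((a :: t).length : Int) - 1 = (t.length : Int) := by simp
    rw [h, PySem.List.pyRange_zero_natCast, List.map_map]
    apply List.ext_getElem
    · simp [pvDiffs, List.length_zip]
    · intro j h1 h2
      simp only [List.getElem_map, List.getElem_range, Function.comp]
      have hj : j < t.length := by simpa using h1
      have e1 : ((j : Int) + 1) = ((j + 1 : Nat) : Int) := by push_cast; ring
      rw [e1, PySem.List.pyGetD_natCast, PySem.List.pyGetD_natCast]
      simp [pvDiffs, List.getElem_zip, List.getD_eq_getElem?_getD,
        Nat.succ_lt_succ hj, List.getElem_cons_succ]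
      rw [List.getElem?_eq_getElem (by simp; omega)]
      simp

-- shared characterisation: r is max(0, sup of multiplicities in ds)
def pvIsMax (ds : List Int) (r : Int) : Prop :=
  0 ≤ r ∧ (∀ k, (ds.count k : Int) ≤ r) ∧ (r = 0 ∨ ∃ k, (ds.count k : Int) = r)

lemma pvUniq {ds : List Int} {a b : Int} (ha : pvIsMax ds a) (hb : pvIsMax ds b) : a = b := by
  obtain ⟨ha0, ha1, ha2⟩ := ha
  obtain ⟨hb0, hb1, hb2⟩ := hb
  apply le_antisymm
  · rcases ha2 with h | ⟨k, hk⟩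
    · omega
    · exact hk ▸ hb1 k
  · rcases hb2 with h | ⟨k, hk⟩
    · omega
    · exact hk ▸ ha1 k

-- loop invariant for A's fold: the dict is the counter of the processed prefix, the accumulator its max multiplicity
lemma pvInv (ds : List Int) : ∀ (pre : List Int) (m : Int),
    0 ≤ m → (∀ k, (pre.count k : Int) ≤ m) → (m = 0 ∨ ∃ k, (pre.count k : Int) = m) →
    (ds.foldl pvStep (PySem.Dict.counter pre, m)).1 = PySem.Dict.counter (pre ++ ds) ∧
    pvIsMax (pre ++ ds) (ds.foldl pvStep (PySem.Dict.counter pre, m)).2 := by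
  induction ds with
  | nil => intro pre m h0 h1 h2; exact ⟨by simp, h0, by simpa using h1, by simpa using h2⟩
  | cons x ds ih =>
    intro pre m h0 h1 h2
    have hstep : pvStep (PySem.Dict.counter pre, m) x
        = (PySem.Dict.counter (pre ++ [x]), max m (((pre ++ [x]).count x : Int))) := by
      simp only [pvStep, ← PySem.Dict.counter_append_singleton, PySem.Dict.getD_counter]
    have hc : ((pre ++ [x]).count x : Int) = (pre.count x : Int) + 1 := by
      simp [List.count_append]
    have h0' : 0 ≤ max m (((pre ++ [x]).count x : Int)) := le_trans h0 (le_max_left _ _)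
    have h1' : ∀ k, ((pre ++ [x]).count k : Int) ≤ max m (((pre ++ [x]).count x : Int)) := by
      intro k
      by_cases hk : k = x
      · subst hk; exact le_max_right _ _
      · have : (pre ++ [x]).count k = pre.count k := by
          simp [List.count_append, Ne.symm hk]
        rw [this]; exact le_trans (h1 k) (le_max_left _ _)
    have h2' : max m (((pre ++ [x]).count x : Int)) = 0 ∨
        ∃ k, ((pre ++ [x]).count k : Int) = max m (((pre ++ [x]).count x : Int)) := by
      rcases le_total m (((pre ++ [x]).count x : Int)) with hle | hle
      · right; exact ⟨x, (max_eq_right hle).symm⟩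
      · rw [max_eq_left hle]
        rcases h2 with rfl | ⟨k, hk⟩
        · exfalso; have := h1 x; omega
        · right; refine ⟨k, ?_⟩
          have hkx : k ≠ x := by
            intro h; subst h; omega
          rw [show (pre ++ [x]).count k = pre.count k by
            simp [List.count_append, Ne.symm hkx]]
          exact hk
    have := ih (pre ++ [x]) (max m (((pre ++ [x]).count x : Int))) h0' h1' h2'
    simpa [List.foldl_cons, hstep, List.append_assoc] using this

lemma pvA (nums : List Int) : pvIsMax (pvDiffs nums) (most_frequency nums) := by
  have hfold : most_frequency nums = ((pvDiffs nums).foldl pvStep (PySem.Dict.empty, 0)).2 := by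
    rw [most_frequency, ← pvMapRange nums, List.foldl_map]
    rfl
  have := pvInv (pvDiffs nums) [] 0 le_rfl (by simp) (Or.inl rfl)
  rw [hfold]
  simpa using this.2

-- (if a > b then a else b) is max b a
lemma pvIfMax (a b : Int) : (if a > b then a else b) = max b a := by
  rcases lt_or_ge b a with h | h
  · rw [if_pos h, max_eq_right h.le]
  · rw [if_neg (not_lt.2 h), max_eq_left h]

-- appending one element to the scanned prefix updates the max multiplicity to max best (new count)
lemma pvMaxAppend (pre : List Int) (d best : Int) (hmax : pvIsMax pre best) :
    pvIsMax (pre ++ [d]) (max best (((pre ++ [d]).count d : Int))) := by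
  obtain ⟨h0, h1, h2⟩ := hmax
  have hc : ((pre ++ [d]).count d : Int) = (pre.count d : Int) + 1 := by
    simp [List.count_append]
  refine ⟨le_trans h0 (le_max_left _ _), ?_, ?_⟩
  · intro k
    by_cases hk : k = d
    · subst hk; exact le_max_right _ _
    · rw [show (pre ++ [d]).count k = pre.count k by simp [List.count_append, Ne.symm hk]]
      exact le_trans (h1 k) (le_max_left _ _)
  · rcases le_total best (((pre ++ [d]).count d : Int)) with hl | hl
    · right; exact ⟨d, (max_eq_right hl).symm⟩
    · rw [max_eq_left hl]
      rcases h2 with rfl | ⟨k, hk⟩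
      · exfalso; omega
      · right
        have hkd : k ≠ d := by
          intro h; subst h; omega
        exact ⟨k, by rw [show (pre ++ [d]).count k = pre.count k by
          simp [List.count_append, Ne.symm hkd]]; exact hk⟩

-- loop invariant for B's run scan over the sorted list: p is a maximal element of the
-- processed prefix, run its multiplicity there, best the max multiplicity so far
lemma pvInvB (ds : List Int) : ∀ (pre : List Int) (best : Int) (p : Int),
    (pre ++ ds).Pairwise (· ≤ ·) →
    p ∈ pre → (∀ x ∈ pre, x ≤ p) →
    pvIsMax pre best →
    pvIsMax (pre ++ ds) (ds.foldl pvStepB (best, (pre.count p : Int), some p)).1 := by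
  induction ds with
  | nil => intro pre best p _ _ _ hmax; simpa using hmax
  | cons d t ih =>
    intro pre best p hpw hp hle hmax
    have hled : ∀ x ∈ pre, x ≤ d := by
      intro x hx
      exact (List.pairwise_append.1 hpw).2.2 x hx d (by simp)
    have hstep : pvStepB (best, (pre.count p : Int), some p) d
        = (max best (((pre ++ [d]).count d : Int)), ((pre ++ [d]).count d : Int), some d) := by
      rcases eq_or_ne d p with rfl | hdp
      · simp [pvStepB, List.count_append]
        split_ifs with h
        · exact (max_eq_right (by omega)).symm
        · exact (max_eq_left (by omega)).symm
      · have hpd : p < d := lt_of_le_of_ne (hled p hp) (Ne.symm hdp)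
        have hdnot : d ∉ pre := fun hmem => absurd (hle d hmem) (not_le.2 hpd)
        have hc : ((pre ++ [d]).count d : Int) = 1 := by
          simp [List.count_append, List.count_eq_zero_of_not_mem hdnot]
        have hne : some d ≠ some p := by simpa using hdp
        simp only [pvStepB, if_neg hne, pvIfMax, hc]
    have hcnt : ((pre ++ [d]).count d : Int) = ((pre ++ [d]).count d : Int) := rfl
    have hle' : ∀ x ∈ pre ++ [d], x ≤ d := by
      intro x hx
      rcases List.mem_append.1 hx with h | h
      · exact hled x h
      · simp at h; omega
    have := ih (pre ++ [d]) (max best (((pre ++ [d]).count d : Int))) d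
      (by simpa [List.append_assoc] using hpw)
      (by simp) hle'
      (pvMaxAppend pre d best hmax)
    simpa [List.foldl_cons, hstep, List.append_assoc] using this

lemma pvB (nums : List Int) : pvIsMax (pvDiffs nums) (most_frequency_alt nums) := by
  have halt : most_frequency_alt nums
      = ((PySem.List.sorted (pvDiffs nums) (fun x => x) false).foldl pvStepB (0, 0, none)).1 := by
    rw [most_frequency_alt, PySem.List.slice_from_one]
    rfl
  rw [halt]
  set s := PySem.List.sorted (pvDiffs nums) (fun x => x) false with hs
  have hperm : s.Perm (pvDiffs nums) := PySem.List.sorted_perm _ _ _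
  have hpw : s.Pairwise (· ≤ ·) := by
    have := PySem.List.sorted_pairwise (pvDiffs nums) (fun x => x)
    simpa using this
  -- transfer pvIsMax along the permutation (counts agree)
  suffices h : pvIsMax s ((s.foldl pvStepB (0, 0, none)).1) by
    obtain ⟨h0, h1, h2⟩ := h
    refine ⟨h0, ?_, ?_⟩
    · intro k; rw [← hperm.count_eq k]; exact h1 k
    · rcases h2 with h | ⟨k, hk⟩
      · exact Or.inl h
      · exact Or.inr ⟨k, by rw [← hperm.count_eq k]; exact hk⟩
  cases hcase : s with
  | nil => simp [pvIsMax]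
  | cons d t =>
    have hpw' : (d :: t).Pairwise (· ≤ ·) := hcase ▸ hpw
    have hstep1 : pvStepB (0, 0, none) d = (1, 1, some d) := by
      simp [pvStepB]
    have := pvInvB t [d] 1 d (by simpa using hpw') (by simp) (by simp)
      (by refine ⟨by omega, ?_, Or.inr ⟨d, by simp⟩⟩
          intro k; by_cases hk : k = d
          · subst hk; simp
          · simp [Ne.symm hk])
    have hc : ([d].count d : Int) = 1 := by simp
    rw [List.foldl_cons, hstep1]
    simpa [hc] using this

-- ===== VERDICT (by name: the statement is the Claim_ definition above) =====
theorem most_frequency_spec : Claim_equal_most_frequency := by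
  intro nums _
  exact pvUniq (pvA nums) (pvB nums)
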